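-- pv_equiv track=rewrite | github.com/zaewoo/AutoAD-Zero | b-stage2/src/main.py | extract_ranked_candidates
-- ===== SOURCE A (Python) =====
-- def extract_ranked_candidates(candidates, candidate_scores, default_best_idx=0):
--     indexed = []
--     for idx, caption in enumerate(candidates):
--         score = candidate_scores[idx] if idx < len(candidate_scores) else None
--         indexed.append((idx, caption, score))
--
--     scored = [entry for entry in indexed if entry[2] is not None]
--     if scored:
--         scored_desc = sorted(scored, key=lambda x: x[2], reverse=True)
--         scored_asc = sorted(scored, key=lambda x: x[2])
--         best = scored_desc[0]
--         second = scored_desc[1] if len(scored_desc) > 1 else None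
--         worst = scored_asc[0]
--     else:
--         safe_idx = min(max(default_best_idx, 0), len(indexed) - 1)
--         best = indexed[safe_idx]
--         second = indexed[1] if len(indexed) > 1 else None
--         worst = indexed[-1]
--
--     return best, second, worst
-- ===== SOURCE B (Python) =====
-- def extract_ranked_candidates(candidates, candidate_scores, default_best_idx=0):
--     # Single linear pass tracking (score, entry) for best / second-best / worst,
--     # with first-occurrence tie-breaking matching a stable sort.
--     best = second = worst = None
--     for idx, caption in enumerate(candidates):
--         if idx < len(candidate_scores):
--             s = candidate_scores[idx]
--             entry = (idx, caption, s)
--             if best is None or s > best[0]: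
--                 best, second = (s, entry), best
--             elif second is None or s > second[0]:
--                 second = (s, entry)
--             if worst is None or s < worst[0]:
--                 worst = (s, entry)
--     if best is not None:
--         return best[1], (second[1] if second is not None else None), worst[1]
--     n = len(candidates)
--     safe_idx = min(max(default_best_idx, 0), n - 1)
--     return ((safe_idx, candidates[safe_idx], None),
--             (1, candidates[1], None) if n > 1 else None,
--             (n - 1, candidates[n - 1], None))
-- ===== Notes on version B (the rewrite author's own statement) =====
-- stated objective: faster
-- what changed: Replaced building an indexed list plus two stable sorts (descending and ascending) with a single linear pass over the candidates that tracks (score, entry) for best, second-best and worst with first-occurrence tie-breaking.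
import Mathlib
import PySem

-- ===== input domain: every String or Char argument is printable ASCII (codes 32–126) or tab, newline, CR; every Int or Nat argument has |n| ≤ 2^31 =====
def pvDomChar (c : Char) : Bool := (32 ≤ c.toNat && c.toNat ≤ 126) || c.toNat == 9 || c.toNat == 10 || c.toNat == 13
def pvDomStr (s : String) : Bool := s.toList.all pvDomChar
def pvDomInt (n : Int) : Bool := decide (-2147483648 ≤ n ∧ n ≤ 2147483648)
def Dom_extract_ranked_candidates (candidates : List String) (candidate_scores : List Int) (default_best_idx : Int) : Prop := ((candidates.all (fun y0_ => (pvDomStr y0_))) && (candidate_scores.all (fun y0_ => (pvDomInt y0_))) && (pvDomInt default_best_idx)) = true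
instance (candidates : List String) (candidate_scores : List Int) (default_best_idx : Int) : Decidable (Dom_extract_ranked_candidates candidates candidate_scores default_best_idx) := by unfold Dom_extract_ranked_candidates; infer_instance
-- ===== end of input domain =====

-- B replaces A's index/filter/two-stable-sorts pipeline by a single linear pass
-- tracking (score, entry) for best / second-best / worst (objective: faster).

-- ===== PORT A =====
def extract_ranked_candidates (candidates : List String) (candidate_scores : List Int) (default_best_idx : Int) : (Int × String × Option Int) × (Option (Int × String × Option Int)) × (Int × String × Option Int) :=
  -- 'candidate_scores[idx] if idx < len(candidate_scores) else None' (idx ≥ 0 from enumerate) is pyGet?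
  let indexed : List (Int × String × Option Int) :=
    (PySem.List.enumerate candidates).foldl
      (fun acc p => acc ++ [(p.1, p.2, PySem.List.pyGet? candidate_scores p.1)]) []
  let scored := indexed.filter (fun e => e.2.2.isSome)
  if scored ≠ [] then
    -- key = x[2]: every entry of scored carries a `some` score, so `.getD 0` reads the exact int
    let scored_desc := PySem.List.sorted scored (fun x => x.2.2.getD 0) true
    let scored_asc := PySem.List.sorted scored (fun x => x.2.2.getD 0) false
    let best := scored_desc.headD (0, "", none)                     -- scored_desc[0]; scored_desc ≠ [] here
    let second := if 1 < scored_desc.length then some (scored_desc.getD 1 (0, "", none)) else none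
    let worst := scored_asc.headD (0, "", none)                     -- scored_asc[0]
    (best, second, worst)
  else
    let safe_idx := min (max default_best_idx 0) ((indexed.length : Int) - 1)
    let best := PySem.List.pyGetD indexed safe_idx (0, "", none)    -- indexed[safe_idx]; IndexError iff candidates = [] (outside Pre_)
    let second := if 1 < indexed.length then some (indexed.getD 1 (0, "", none)) else none
    let worst := PySem.List.pyGetD indexed (-1) (0, "", none)       -- indexed[-1]
    (best, second, worst)

-- ===== PORT B =====
-- the body of Source B's for-loop, as a named step function of the fold
def pvBStep (candidate_scores : List Int)
    (st : Option (Int × (Int × String × Option Int)) × Option (Int × (Int × String × Option Int)) × Option (Int × (Int × String × Option Int)))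
    (p : Int × String) :
    Option (Int × (Int × String × Option Int)) × Option (Int × (Int × String × Option Int)) × Option (Int × (Int × String × Option Int)) :=
  if p.1 < (candidate_scores.length : Int) then
    let s := PySem.List.pyGetD candidate_scores p.1 0
    let entry : Int × String × Option Int := (p.1, p.2, some s)
    let bs :=
      match st.1 with
      | none => (some (s, entry), st.2.1)
      | some b =>
        if b.1 < s then (some (s, entry), some b)
        else
          match st.2.1 with
          | none => (some b, some (s, entry))
          | some sec => if sec.1 < s then (some b, some (s, entry)) else (some b, some sec)
    let w :=
      match st.2.2 with
      | none => some (s, entry)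
      | some w => if s < w.1 then some (s, entry) else some w
    (bs.1, bs.2, w)
  else st

def extract_ranked_candidates_alt (candidates : List String) (candidate_scores : List Int) (default_best_idx : Int) : (Int × String × Option Int) × (Option (Int × String × Option Int)) × (Int × String × Option Int) :=
  let st := (PySem.List.enumerate candidates).foldl (pvBStep candidate_scores) (none, none, none)
  match st.1, st.2.2 with
  | some b, some w => (b.2, st.2.1.map (fun q => q.2), w.2)
  | some b, none => (b.2, st.2.1.map (fun q => q.2), b.2)           -- unreachable: worst is set whenever best is
  | none, _ =>
    let n := (candidates.length : Int)
    let safe_idx := min (max default_best_idx 0) (n - 1)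
    ((safe_idx, PySem.List.pyGetD candidates safe_idx "", none),
     if 1 < n then some ((1 : Int), PySem.List.pyGetD candidates 1 "", none) else none,
     (n - 1, PySem.List.pyGetD candidates (n - 1) "", none))

-- ===== PRECONDITION & SPEC =====
-- Pre_ excludes only candidates = [], on which the Python A raises IndexError (indexed[safe_idx] on an empty list).
def Pre_extract_ranked_candidates (candidates : List String) (candidate_scores : List Int) (default_best_idx : Int) : Prop := candidates ≠ []
instance (candidates : List String) (candidate_scores : List Int) (default_best_idx : Int) : Decidable (Pre_extract_ranked_candidates candidates candidate_scores default_best_idx) := by unfold Pre_extract_ranked_candidates; infer_instance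
def pvWitness_extract_ranked_candidates : List String × List Int × Int := (["a", "b"], ([3, 7], 0))
def Spec_extract_ranked_candidates (candidates : List String) (candidate_scores : List Int) (default_best_idx : Int) (out : (Int × String × Option Int) × (Option (Int × String × Option Int)) × (Int × String × Option Int)) : Prop := out = extract_ranked_candidates_alt candidates candidate_scores default_best_idx
instance (candidates : List String) (candidate_scores : List Int) (default_best_idx : Int) (out : (Int × String × Option Int) × (Option (Int × String × Option Int)) × (Int × String × Option Int)) : Decidable (Spec_extract_ranked_candidates candidates candidate_scores default_best_idx out) := by unfold Spec_extract_ranked_candidates; infer_instance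

-- ===== CLAIM (what is proved, stated in full; the proofs are below) =====
def Claim_equal_extract_ranked_candidates : Prop := ∀ (candidates : List String) (candidate_scores : List Int) (default_best_idx : Int), Dom_extract_ranked_candidates candidates candidate_scores default_best_idx → Pre_extract_ranked_candidates candidates candidate_scores default_best_idx → Spec_extract_ranked_candidates candidates candidate_scores default_best_idx (extract_ranked_candidates candidates candidate_scores default_best_idx)

-- ===== LEMMAS AND PROOFS =====

-- the key A sorts by
def pvK (e : Int × String × Option Int) : Int := e.2.2.getD 0

-- abstract top-2 step (what insertion into a list does to its first two elements)
def pvStep2 (st : Option (Int × String × Option Int) × Option (Int × String × Option Int)) (x : Int × String × Option Int) : Option (Int × String × Option Int) × Option (Int × String × Option Int) :=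
  match st.1 with
  | none => (some x, st.2)
  | some b =>
    if pvK b < pvK x then (some x, some b)
    else
      match st.2 with
      | none => (some b, some x)
      | some sec => if pvK sec < pvK x then (some b, some x) else (some b, some sec)

-- abstract min step
def pvStepMin (st : Option (Int × String × Option Int)) (x : Int × String × Option Int) : Option (Int × String × Option Int) :=
  match st with
  | none => some x
  | some w => if pvK x < pvK w then some x else some w

-- the entries B actually processes, in order
def pvScoredOf (candidate_scores : List Int) (l : List (Int × String)) : List (Int × String × Option Int) :=
  l.filterMap (fun p => if p.1 < (candidate_scores.length : Int) then some (p.1, p.2, some (PySem.List.pyGetD candidate_scores p.1 0)) else none)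

-- B's state is the (key, entry)-tagged image of the abstract state
def pvLift (o : Option (Int × String × Option Int)) : Option (Int × (Int × String × Option Int)) :=
  o.map (fun e => (pvK e, e))

theorem pvIns2 (s : List (Int × String × Option Int)) (x : Int × String × Option Int) :
    (((PySem.List.insertBy (fun a b => decide (pvK b < pvK a)) x s))[0]?,
     ((PySem.List.insertBy (fun a b => decide (pvK b < pvK a)) x s))[1]?) = pvStep2 (s[0]?, s[1]?) x := by
  match s with
  | [] => simp [PySem.List.insertBy, pvStep2]
  | [a] =>
    by_cases h1 : pvK a < pvK x <;>
      simp [PySem.List.insertBy, pvStep2, h1]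
  | a :: b :: t =>
    by_cases h1 : pvK a < pvK x
    · simp [PySem.List.insertBy, pvStep2, h1]
    · by_cases h2 : pvK b < pvK x <;>
        simp [PySem.List.insertBy, pvStep2, h1, h2]

theorem pvInsMin (s : List (Int × String × Option Int)) (x : Int × String × Option Int) :
    ((PySem.List.insertBy (fun a b => decide (pvK a < pvK b)) x s))[0]? = pvStepMin s[0]? x := by
  match s with
  | [] => simp [PySem.List.insertBy, pvStepMin]
  | a :: t =>
    by_cases h1 : pvK x < pvK a <;>
      simp [PySem.List.insertBy, pvStepMin, h1]

theorem pvFold2 (l : List (Int × String × Option Int)) (s : List (Int × String × Option Int)) :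
    (((l.foldl (fun acc x => PySem.List.insertBy (fun a b => decide (pvK b < pvK a)) x acc) s))[0]?,
     ((l.foldl (fun acc x => PySem.List.insertBy (fun a b => decide (pvK b < pvK a)) x acc) s))[1]?)
    = l.foldl pvStep2 (s[0]?, s[1]?) := by
  induction l generalizing s with
  | nil => simp
  | cons x xs ih =>
    simp only [List.foldl_cons]
    rw [ih, ← pvIns2]

theorem pvFoldMin (l : List (Int × String × Option Int)) (s : List (Int × String × Option Int)) :
    ((l.foldl (fun acc x => PySem.List.insertBy (fun a b => decide (pvK a < pvK b)) x acc) s))[0]?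
    = l.foldl pvStepMin s[0]? := by
  induction l generalizing s with
  | nil => simp
  | cons x xs ih =>
    simp only [List.foldl_cons]
    rw [ih, ← pvInsMin]

theorem pvSorted_desc_top2 (l : List (Int × String × Option Int)) :
    ((PySem.List.sorted l (fun x => x.2.2.getD 0) true)[0]?,
     (PySem.List.sorted l (fun x => x.2.2.getD 0) true)[1]?) = l.foldl pvStep2 (none, none) := by
  rw [PySem.List.sorted_rev_eq_foldl_insertBy]
  have h := pvFold2 l []
  simpa [pvK] using h

theorem pvSorted_asc_min (l : List (Int × String × Option Int)) :
    (PySem.List.sorted l (fun x => x.2.2.getD 0) false)[0]? = l.foldl pvStepMin none := by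
  rw [PySem.List.sorted_eq_foldl_insertBy]
  have h := pvFoldMin l []
  simpa [pvK] using h

theorem pvBStep_hit (candidate_scores : List Int) (p : Int × String)
    (hp : p.1 < (candidate_scores.length : Int))
    (t2 : Option (Int × String × Option Int) × Option (Int × String × Option Int))
    (w : Option (Int × String × Option Int)) :
    pvBStep candidate_scores (pvLift t2.1, pvLift t2.2, pvLift w) p
    = (pvLift (pvStep2 t2 (p.1, p.2, some (PySem.List.pyGetD candidate_scores p.1 0))).1,
       pvLift (pvStep2 t2 (p.1, p.2, some (PySem.List.pyGetD candidate_scores p.1 0))).2,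
       pvLift (pvStepMin w (p.1, p.2, some (PySem.List.pyGetD candidate_scores p.1 0)))) := by
  obtain ⟨b, sec⟩ := t2
  simp only [pvBStep, if_pos hp]
  cases b <;> cases sec <;> cases w <;>
    simp only [pvStep2, pvStepMin, pvLift, pvK, Option.map_some, Option.map_none] <;>
    (try split_ifs) <;> (try simp_all) <;> omega

theorem pvMainFold (candidate_scores : List Int) (l : List (Int × String))
    (t2 : Option (Int × String × Option Int) × Option (Int × String × Option Int))
    (w : Option (Int × String × Option Int)) :
    l.foldl (pvBStep candidate_scores) (pvLift t2.1, pvLift t2.2, pvLift w)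
    = (pvLift ((pvScoredOf candidate_scores l).foldl pvStep2 t2).1,
       pvLift ((pvScoredOf candidate_scores l).foldl pvStep2 t2).2,
       pvLift ((pvScoredOf candidate_scores l).foldl pvStepMin w)) := by
  induction l generalizing t2 w with
  | nil => simp [pvScoredOf]
  | cons p ps ih =>
    simp only [List.foldl_cons, pvScoredOf, List.filterMap_cons]
    by_cases hp : p.1 < (candidate_scores.length : Int)
    · rw [pvBStep_hit candidate_scores p hp t2 w]
      rw [ih (pvStep2 t2 (p.1, p.2, some (PySem.List.pyGetD candidate_scores p.1 0)))
             (pvStepMin w (p.1, p.2, some (PySem.List.pyGetD candidate_scores p.1 0)))]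
      simp [pvScoredOf, hp]
    · have : pvBStep candidate_scores (pvLift t2.1, pvLift t2.2, pvLift w) p
           = (pvLift t2.1, pvLift t2.2, pvLift w) := by
        simp [pvBStep, hp]
      rw [this, ih t2 w]
      simp [pvScoredOf, hp]

-- scored (A's filtered list) = the entries B processes
theorem pvScored_eq (candidate_scores : List Int) (l : List (Int × String)) (h : ∀ p ∈ l, 0 ≤ p.1) :
    ((l.map (fun p => (p.1, p.2, PySem.List.pyGet? candidate_scores p.1))).filter
       (fun e => e.2.2.isSome)) = pvScoredOf candidate_scores l := by
  induction l with
  | nil => simp [pvScoredOf]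
  | cons p ps ih =>
    have hp : 0 ≤ p.1 := h p (List.mem_cons_self)
    have hrest := ih (fun q hq => h q (List.mem_cons_of_mem _ hq))
    by_cases hlt : p.1 < (candidate_scores.length : Int)
    · have hsome : PySem.List.pyGet? candidate_scores p.1 = some (PySem.List.pyGetD candidate_scores p.1 0) := by
        have hn : p.1.toNat < candidate_scores.length := by omega
        simp [PySem.List.pyGet?, PySem.List.pyIdx?, hp, hlt, PySem.List.pyGetD,
              List.getElem?_eq_getElem hn]
      simp only [List.map_cons, List.filter_cons, pvScoredOf, List.filterMap_cons, hsome, if_pos hlt]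
      simp only [Option.isSome_some, decide_true, if_true]
      rw [hrest]
      simp [pvScoredOf]
    · have hnone : PySem.List.pyGet? candidate_scores p.1 = none := by
        have : ¬ (p.1 < (candidate_scores.length : Int)) := hlt
        simp [PySem.List.pyGet?, PySem.List.pyIdx?, hp]
        omega
      simp only [List.map_cons, List.filter_cons, pvScoredOf, List.filterMap_cons, hnone, if_neg hlt]
      simp only [Option.isSome_none, decide_false, if_false]
      rw [hrest]
      simp [pvScoredOf]

theorem pvStep2_fst_isSome (l : List (Int × String × Option Int)) (st : Option (Int × String × Option Int) × Option (Int × String × Option Int)) (h : st.1.isSome ∨ l ≠ []) :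
    ((l.foldl pvStep2 st).1).isSome := by
  induction l generalizing st with
  | nil =>
    rcases h with h | h
    · simpa using h
    · simp at h
  | cons x xs ih =>
    simp only [List.foldl_cons]
    apply ih
    left
    obtain ⟨b, sec⟩ := st
    cases b with
    | none => simp [pvStep2]
    | some b =>
      simp only [pvStep2]
      split_ifs <;> cases sec <;> simp_all [pvStep2] <;> split_ifs <;> simp

theorem pvStepMin_isSome (l : List (Int × String × Option Int)) (st : Option (Int × String × Option Int)) (h : st.isSome ∨ l ≠ []) :
    (l.foldl pvStepMin st).isSome := by
  induction l generalizing st with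
  | nil =>
    rcases h with h | h
    · simpa using h
    · simp at h
  | cons x xs ih =>
    simp only [List.foldl_cons]
    apply ih
    left
    cases st with
    | none => simp [pvStepMin]
    | some w =>
      simp only [pvStepMin]
      split_ifs <;> simp

theorem pvIf_second (l : List (Int × String × Option Int)) (d : Int × String × Option Int) :
    (if 1 < l.length then some (l.getD 1 d) else none) = l[1]? := by
  by_cases h : 1 < l.length
  · simp [h, List.getD, List.getElem?_eq_getElem h]
  · have h1 : l[1]? = none := List.getElem?_eq_none (by omega)
    simp [h, h1]

theorem pvGetD_map_enum (candidates : List String) (g : Int × String → Int × String × Option Int)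
    (i : Int) (d : Int × String × Option Int) (h0 : 0 ≤ i) (h1 : i < (candidates.length : Int)) :
    PySem.List.pyGetD ((PySem.List.enumerate candidates).map g) i d
    = g (i, candidates[i.toNat]'(by omega)) := by
  have hlen : i < (((PySem.List.enumerate candidates).map g).length : Int) := by
    simp [PySem.List.length_enumerate]; omega
  rw [PySem.List.pyGetD_eq_getElem _ d h0 hlen]
  have hk : i.toNat < (PySem.List.enumerate candidates).length := by
    rw [PySem.List.length_enumerate]; omega
  rw [List.getElem_map]
  rw [PySem.List.getElem_enumerate candidates 0 i.toNat hk]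
  congr 2
  omega

theorem pvMap_snd_lift (o : Option (Int × String × Option Int)) :
    (o.map (fun e => (pvK e, e))).map (fun q => q.2) = o := by
  cases o <;> simp

theorem pvNeg_one {α : Type} (xs : List α) (d : α) (h : 0 < xs.length) :
    PySem.List.pyGetD xs (-1) d = xs[xs.length - 1]'(by omega) := by
  have h1 : ¬ (0:Int) ≤ -1 := by omega
  have h2 : -(xs.length:Int) ≤ -1 := by omega
  simp only [PySem.List.pyGetD, PySem.List.pyGet?, PySem.List.pyIdx?, h1, if_false, h2, if_true,
    if_pos h2]
  simp [List.getElem?_eq_getElem (show xs.length - 1 < xs.length by omega)]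

-- ===== VERDICT (by name: the statement is the Claim_ definition above) =====
theorem extract_ranked_candidates_spec : Claim_equal_extract_ranked_candidates := by
  intro candidates candidate_scores default_best_idx _hdom hpre
  unfold Spec_extract_ranked_candidates
  unfold Pre_extract_ranked_candidates at hpre
  unfold extract_ranked_candidates extract_ranked_candidates_alt
  simp only [PySem.List.foldl_append_singleton_eq_map, List.nil_append]
  have hpos : ∀ p ∈ PySem.List.enumerate candidates, 0 ≤ p.1 := by
    intro p hp
    rw [PySem.List.mem_enumerate_iff] at hp
    obtain ⟨k, hk, rfl⟩ := hp
    simp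
  rw [pvScored_eq candidate_scores (PySem.List.enumerate candidates) hpos]
  have hfold := pvMainFold candidate_scores (PySem.List.enumerate candidates) (none, none) none
  simp only [pvLift, Option.map_none] at hfold
  rw [hfold]
  by_cases hcase : pvScoredOf candidate_scores (PySem.List.enumerate candidates) = []
  · -- no scored entries: both take the positional fallback
    rw [hcase]
    simp only [List.foldl_nil, Option.map_none, ne_eq, not_true_eq_false, if_false, reduceCtorEq]
    have hn : 0 < candidates.length := List.length_pos_iff.mpr hpre
    have hs : candidate_scores = [] := by
      cases hcand : candidates with
      | nil => exact absurd hcand hpre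
      | cons c0 cs =>
        have hmem : ((0 : Int), c0) ∈ PySem.List.enumerate candidates := by
          rw [hcand, PySem.List.enumerate_cons]
          exact List.mem_cons_self
        have := (List.filterMap_eq_nil_iff.mp hcase) _ hmem
        simp only [ite_eq_right_iff, reduceCtorEq] at this
        have hlen : ¬ ((0:Int) < (candidate_scores.length : Int)) := fun hlt => this hlt
        have : candidate_scores.length = 0 := by omega
        exact List.length_eq_zero_iff.mp this
    subst hs
    have hget : ∀ i : Int, PySem.List.pyGet? ([] : List Int) i = none := by
      intro i
      simp only [PySem.List.pyGet?, PySem.List.pyIdx?]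
      split_ifs <;> simp_all <;> omega
    simp only [hget]
    have hlenmap : (List.map (fun (x : Int × String) => (x.1, x.2, (none : Option Int))) (PySem.List.enumerate candidates)).length = candidates.length := by
      simp [PySem.List.length_enumerate]
    have hs0 : 0 ≤ min (max default_best_idx 0) ((candidates.length : Int) - 1) := by omega
    have hs1 : min (max default_best_idx 0) ((candidates.length : Int) - 1) < (candidates.length : Int) := by omega
    refine Prod.ext ?_ (Prod.ext ?_ ?_)
    · -- best
      rw [hlenmap]
      rw [pvGetD_map_enum candidates _ _ _ hs0 hs1]
      simp only
      refine Prod.ext rfl (Prod.ext ?_ rfl)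
      simp only
      rw [PySem.List.pyGetD_eq_getElem candidates "" hs0 hs1]
    · -- second
      rw [hlenmap]
      by_cases h2 : 1 < candidates.length
      · have h2' : (1:Int) < (candidates.length : Int) := by exact_mod_cast h2
        simp only [if_pos h2, if_pos h2']
        have hl2 : 1 < (PySem.List.enumerate candidates).length := by
          rw [PySem.List.length_enumerate]; omega
        rw [List.getD, List.getElem?_eq_getElem (by simpa [PySem.List.length_enumerate] using h2), Option.getD_some]
        rw [List.getElem_map, PySem.List.getElem_enumerate candidates 0 1 hl2]
        have : PySem.List.pyGetD candidates 1 "" = candidates[(1:Int).toNat]'(by simpa using h2) :=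
          PySem.List.pyGetD_eq_getElem candidates "" (by omega) (by exact_mod_cast h2)
        simp [this]
      · have h2' : ¬ ((1:Int) < (candidates.length : Int)) := by exact_mod_cast h2
        simp [h2, h2']
    · -- worst
      rw [pvNeg_one _ _ (by omega)]
      simp only [List.getElem_map, List.length_map, PySem.List.length_enumerate,
        PySem.List.getElem_enumerate]
      have hc : ((candidates.length - 1 : Nat) : Int) = (candidates.length : Int) - 1 := by omega
      refine Prod.ext (by simpa using hc) (Prod.ext ?_ rfl)
      simp only
      rw [PySem.List.pyGetD_eq_getElem candidates "" (by omega) (by omega)]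
      congr 1
      omega
  · -- scored entries exist: sorted heads = linear-pass extrema
    simp only [ne_eq, hcase, not_false_eq_true, if_true]
    have hT := pvSorted_desc_top2 (pvScoredOf candidate_scores (PySem.List.enumerate candidates))
    have hM := pvSorted_asc_min (pvScoredOf candidate_scores (PySem.List.enumerate candidates))
    obtain ⟨b, hb⟩ := Option.isSome_iff_exists.mp
      (pvStep2_fst_isSome (pvScoredOf candidate_scores (PySem.List.enumerate candidates)) (none, none) (Or.inr hcase))
    obtain ⟨w, hw⟩ := Option.isSome_iff_exists.mp
      (pvStepMin_isSome (pvScoredOf candidate_scores (PySem.List.enumerate candidates)) none (Or.inr hcase))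
    have h0 : (PySem.List.sorted (pvScoredOf candidate_scores (PySem.List.enumerate candidates)) (fun x => x.2.2.getD 0) true)[0]? = some b := by
      have := congrArg Prod.fst hT
      simpa [hb] using this
    have h1 : (PySem.List.sorted (pvScoredOf candidate_scores (PySem.List.enumerate candidates)) (fun x => x.2.2.getD 0) true)[1]?
        = ((pvScoredOf candidate_scores (PySem.List.enumerate candidates)).foldl pvStep2 (none, none)).2 := by
      have := congrArg Prod.snd hT
      simpa using this
    have hm0 : (PySem.List.sorted (pvScoredOf candidate_scores (PySem.List.enumerate candidates)) (fun x => x.2.2.getD 0) false)[0]? = some w := by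
      rw [hM, hw]
    rw [List.headD_eq_head?, List.head?_eq_getElem?, h0]
    rw [List.headD_eq_head?, List.head?_eq_getElem?, hm0]
    rw [pvIf_second, h1, hb, hw]
    simp only [pvLift, Option.map_some, Option.getD_some]
    rw [pvMap_snd_lift]
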